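-- pv_equiv track=rewrite | github.com/malkoG/polyglot-cp | BOJ/Backtracking/Python/16494.py | solve
-- ===== SOURCE A (Python) =====
-- def maximum_sum(arr):
--     if len(arr) == 0:
--         return 0
--
--     ans = -100000
--     for i in range(len(arr)):
--         for j in range(i+1,len(arr)+1):
--             ans = max(ans, sum(arr[i:j]))
--
--     return ans
--
-- def solve(arr, result, depth, limit):
--     if len(arr) == 0:
--         return result if depth == limit else -100000
--
--     if depth == limit:
--         return result
--
--     ans = -100000
--     for j in range(1, len(arr)+1):
--         ans = max(solve(arr[j:], result + maximum_sum(arr[:j]), depth + 1, limit), ans)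
--
--     return ans
-- ===== SOURCE B (Python) =====
-- def solve(arr, result, depth, limit):
--     if depth == limit:
--         return result
--     k = limit - depth
--     n = len(arr)
--     if k < 1 or n == 0 or k > n:
--         # fewer than 1, or more than n, nonempty segments: impossible
--         return -100000
--
--     def capped_best(suffix):
--         # capped max-subarray sum of a nonempty list (Kadane's scan)
--         best_end = best = None
--         for x in suffix:
--             best_end = x if best_end is None else max(x, x + best_end)
--             best = best_end if best is None else max(best, best_end)
--         return max(-100000, best)
--
--     def split_best(suffix, later):
--         # later[j] = dp value of suffix[j+1:] (len(later) = len(suffix)-1);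
--         # best over splits of suffix into a first segment and a nonempty rest
--         best_end = best = acc = None
--         for x, d in zip(suffix, later):
--             best_end = x if best_end is None else max(x, x + best_end)
--             best = best_end if best is None else max(best, best_end)
--             if d is not None:
--                 cand = max(-100000, best) + d
--                 acc = cand if acc is None else max(acc, cand)
--         return acc
--
--     suffixes = [arr[i:] for i in range(n)]
--     dp = [capped_best(s) for s in suffixes]
--     for _ in range(k - 1):
--         dp = [split_best(s, dp[i + 1:]) for i, s in enumerate(suffixes)]
--     return -100000 if dp[0] is None else max(-100000, result + dp[0])
-- ===== Notes on version B (the rewrite author's own statement) =====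
-- stated objective: faster
-- what changed: Replaced the exponential recursion over all partitions (with a quadratic brute-force max-subarray per segment) by a bottom-up interval DP over suffixes with Kadane scans: dp_k[i] is the best capped value of splitting arr[i:] into k segments, built level by level.
import Mathlib
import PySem

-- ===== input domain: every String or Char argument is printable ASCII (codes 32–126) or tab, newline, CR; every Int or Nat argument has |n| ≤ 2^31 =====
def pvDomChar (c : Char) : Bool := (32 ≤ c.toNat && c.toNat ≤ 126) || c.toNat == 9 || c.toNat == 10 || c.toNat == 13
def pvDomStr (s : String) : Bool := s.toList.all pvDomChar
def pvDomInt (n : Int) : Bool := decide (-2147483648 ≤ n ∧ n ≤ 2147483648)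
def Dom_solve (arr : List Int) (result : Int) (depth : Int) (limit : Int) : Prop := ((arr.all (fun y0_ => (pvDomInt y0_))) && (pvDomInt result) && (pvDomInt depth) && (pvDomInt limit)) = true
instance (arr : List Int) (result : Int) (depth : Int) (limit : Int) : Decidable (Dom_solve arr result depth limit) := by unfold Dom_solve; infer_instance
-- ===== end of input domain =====

-- B replaces A's exponential recursion over all partitions by a bottom-up DP over
-- suffixes with Kadane scans (measurably faster; return values proved equal).

-- ===== PORT A =====
-- A's helper maximum_sum: brute-force max over all contiguous slice sums
def msA (arr : List Int) : Int :=
  if arr.length = 0 then 0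
  else
    (PySem.List.pyRange 0 (arr.length : Int) 1).foldl (fun ans i =>
      (PySem.List.pyRange (i+1) ((arr.length : Int)+1) 1).foldl (fun ans2 j =>
        max ans2 (PySem.List.slice arr (some i) (some j)).sum) ans) (-100000)

def solve (arr : List Int) (result : Int) (depth : Int) (limit : Int) : Int :=
  if arr.length = 0 then (if depth = limit then result else -100000)
  else if depth = limit then result
  else
    (PySem.List.pyRange 1 ((arr.length : Int)+1) 1).attach.foldl
      (fun ans j =>
        max (solve (PySem.List.slice arr (some j.1) none)
              (result + msA (PySem.List.slice arr none (some j.1)))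
              (depth+1) limit) ans)
      (-100000)
termination_by arr.length
decreasing_by
  have hj := PySem.List.mem_pyRange_one.mp j.2
  rw [PySem.List.slice_from arr (by omega : (0:Int) ≤ j.1)]
  simp only [List.length_drop]
  omega

-- ===== PORT B =====
-- the Kadane state update shared by Source B's capped_best / split_best scans:
-- (best_end, best) with None as "not started yet"
def kadUpd (p : Option Int × Option Int) (x : Int) : Option Int × Option Int :=
  let be := match p.1 with | none => x | some b => max x (x + b)
  let b  := match p.2 with | none => be | some v => max v be
  (some be, some b)

-- cf. Source B capped_best: capped max-subarray sum of a nonempty list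
def cappedBest (suffix : List Int) : Int :=
  let st := suffix.foldl kadUpd (none, none)
  max (-100000) (st.2.getD 0)   -- suffix is nonempty at every call site, so st.2 is an int in Source B

-- cf. Source B split_best loop body
def splitStep (p : (Option Int × Option Int) × Option Int) (xd : Int × Option Int) :
    (Option Int × Option Int) × Option Int :=
  let kb := kadUpd p.1 xd.1
  let acc := match xd.2 with
    | none => p.2
    | some d =>
        let cand := max (-100000) (kb.2.getD 0) + d
        match p.2 with | none => some cand | some a => some (max a cand)
  (kb, acc)

-- cf. Source B split_best: best over splits of suffix into first segment + nonempty rest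
def splitBest (suffix : List Int) (later : List (Option Int)) : Option Int :=
  ((List.zip suffix later).foldl splitStep ((none, none), none)).2

-- cf. Source B: the 'for _ in range(k-1)' relaxation loop
def bLevels (suffixes : List (List Int)) (dp : List (Option Int)) : Nat → List (Option Int)
  | 0 => dp
  | t+1 => bLevels suffixes
      ((PySem.List.enumerate suffixes 0).map
        (fun si => splitBest si.2 (dp.drop (si.1 + 1).toNat))) t

def solve_alt (arr : List Int) (result : Int) (depth : Int) (limit : Int) : Int :=
  if depth = limit then result
  else
    let k := limit - depth
    -- fewer than 1, or more than len(arr), nonempty segments: impossible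
    if k < 1 ∨ arr.length = 0 ∨ (arr.length : Int) < k then -100000
    else
      let suffixes := (List.range arr.length).map (fun i => arr.drop i)
      let dp0 : List (Option Int) := suffixes.map (fun s => some (cappedBest s))
      let dp := bLevels suffixes dp0 (k - 1).toNat
      match dp.getD 0 none with
      | none => -100000
      | some v => max (-100000) (result + v)

-- ===== PRECONDITION & SPEC =====
def Spec_solve (arr : List Int) (result : Int) (depth : Int) (limit : Int) (out : Int) : Prop := out = solve_alt arr result depth limit
instance (arr : List Int) (result : Int) (depth : Int) (limit : Int) (out : Int) : Decidable (Spec_solve arr result depth limit out) := by unfold Spec_solve; infer_instance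

-- ===== CLAIM (what is proved, stated in full; the proofs are below) =====
def Claim_equal_solve : Prop := ∀ (arr : List Int) (result : Int) (depth : Int) (limit : Int), Dom_solve arr result depth limit → Spec_solve arr result depth limit (solve arr result depth limit)

-- ===== LEMMAS AND PROOFS =====

-- max of an optional pair / of a list, with none = "minus infinity"
def omax : Option Int → Option Int → Option Int
  | none, b => b
  | some a, none => some a
  | some a, some b => some (max a b)

def lmax (xs : List Int) : Option Int := xs.foldr (fun x m => omax (some x) m) none

-- sums of all nonempty prefixes / contiguous segments / nonempty suffixes
def presums : List Int → List Int
  | [] => []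
  | x :: t => x :: (presums t).map (x + ·)

def segSums : List Int → List Int
  | [] => []
  | x :: t => presums (x :: t) ++ segSums t

def sufSums : List Int → List Int
  | [] => []
  | x :: t => (x + t.sum) :: sufSums t

-- what A's maximum_sum computes on a nonempty list (and 0 on [])
def MS (l : List Int) : Int := match lmax (segSums l) with
  | none => 0
  | some v => max (-100000) v

-- the mathematical DP value: best capped total over partitions into k segments
def G : Nat → List Int → Option Int
  | 0, _ => none
  | 1, l => if l.isEmpty then none else some (MS l)
  | (k+2), l => lmax ((List.range (l.length - 1)).filterMap
      (fun j => (G (k+1) (l.drop (j+1))).map (fun v => MS (l.take (j+1)) + v)))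

-- spec of split_best's accumulator
def SC (p : List Int) : List Int → List (Option Int) → Option Int
  | _, [] => none
  | [], _ :: _ => none
  | x :: t, d :: ds => omax (d.map (fun v => MS (p ++ [x]) + v)) (SC (p ++ [x]) t ds)

-- ---- omax / lmax toolkit ----
lemma omax_none_right (a : Option Int) : omax a none = a := by cases a <;> rfl

lemma omax_assoc (a b c : Option Int) : omax (omax a b) c = omax a (omax b c) := by
  cases a <;> cases b <;> cases c <;> simp [omax, max_assoc]

lemma lmax_nil : lmax [] = none := rfl

lemma lmax_cons (x : Int) (t : List Int) : lmax (x :: t) = omax (some x) (lmax t) := rfl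

lemma lmax_append (xs ys : List Int) : lmax (xs ++ ys) = omax (lmax xs) (lmax ys) := by
  induction xs with
  | nil => simp [lmax_nil, omax]
  | cons x t ih => simp [lmax_cons, ih, omax_assoc]

lemma lmax_eq_none_iff (xs : List Int) : lmax xs = none ↔ xs = [] := by
  cases xs with
  | nil => simp [lmax_nil]
  | cons x t => simp [lmax_cons]; cases lmax t <;> simp [omax]

lemma lmax_map_add (c : Int) (xs : List Int) :
    lmax (xs.map (fun x => x + c)) = (lmax xs).map (fun x => x + c) := by
  induction xs with
  | nil => simp [lmax_nil]
  | cons x t ih =>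
      simp only [List.map_cons, lmax_cons, ih]
      cases lmax t <;> simp [omax, max_add_add_right]

lemma le_lmax (xs : List Int) (x : Int) (hx : x ∈ xs) : ∃ m, lmax xs = some m ∧ x ≤ m := by
  induction xs with
  | nil => cases hx
  | cons y t ih =>
      rw [lmax_cons]
      rcases List.mem_cons.mp hx with h | h
      · cases ht : lmax t with
        | none => exact ⟨y, by simp [omax], by rw [h]⟩
        | some m => exact ⟨max y m, by simp [omax], by simp [h]⟩
      · obtain ⟨m, hm, hle⟩ := ih h
        rw [hm]
        exact ⟨max y m, by simp [omax], le_trans hle (le_max_right _ _)⟩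

lemma lmax_mem (xs : List Int) (m : Int) (h : lmax xs = some m) : m ∈ xs := by
  induction xs generalizing m with
  | nil => simp [lmax_nil] at h
  | cons y t ih =>
      rw [lmax_cons] at h
      cases ht : lmax t with
      | none => rw [ht] at h; simp [omax] at h; simp [h]
      | some w =>
          rw [ht] at h; simp [omax] at h
          rcases max_cases y w with ⟨he, _⟩ | ⟨he, _⟩
          · subst h; rw [he]; simp
          · subst h; rw [he]; exact List.mem_cons_of_mem _ (ih w ht)

lemma lmax_eq_some (xs : List Int) (m : Int) (hmem : m ∈ xs) (hub : ∀ x ∈ xs, x ≤ m) :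
    lmax xs = some m := by
  obtain ⟨w, hw, hle⟩ := le_lmax xs m hmem
  have := hub w (lmax_mem xs w hw)
  rw [hw]; congr 1; omega

lemma lmax_congr (xs ys : List Int)
    (h1 : ∀ x ∈ xs, ∃ y ∈ ys, x ≤ y) (h2 : ∀ y ∈ ys, ∃ x ∈ xs, y ≤ x) :
    lmax xs = lmax ys := by
  cases hx : lmax xs with
  | none =>
      rw [lmax_eq_none_iff] at hx; subst hx
      cases hy : lmax ys with
      | none => rfl
      | some m => obtain ⟨x, hx, _⟩ := h2 m (lmax_mem _ _ hy); cases hx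
  | some m =>
      have hmem := lmax_mem _ _ hx
      obtain ⟨y, hy, hle⟩ := h1 m hmem
      obtain ⟨w, hw, hle2⟩ := le_lmax ys y hy
      rw [hw]; congr 1
      obtain ⟨x2, hx2, hle3⟩ := h2 w (lmax_mem _ _ hw)
      obtain ⟨m2, hm2, hle4⟩ := le_lmax xs x2 hx2
      rw [hx] at hm2; cases hm2
      omega

lemma lmax_filterMap_cons {α : Type} (f : α → Option Int) (a : α) (r : List α) :
    lmax (List.filterMap f (a :: r)) = omax (f a) (lmax (List.filterMap f r)) := by
  cases hfa : f a <;> simp [hfa, lmax_cons, omax]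

-- ---- membership characterisations ----
lemma mem_presums (l : List Int) (v : Int) :
    v ∈ presums l ↔ ∃ m, 1 ≤ m ∧ m ≤ l.length ∧ v = (l.take m).sum := by
  induction l generalizing v with
  | nil =>
      constructor
      · intro h; cases h
      · rintro ⟨m, h1, h2, -⟩; simp at h2; omega
  | cons x t ih =>
      constructor
      · intro hv
        rcases List.mem_cons.mp hv with h | h
        · exact ⟨1, le_refl 1, by simp, by simp [h]⟩
        · obtain ⟨w, hw, hvw⟩ := List.mem_map.mp h
          obtain ⟨m, h1, h2, h3⟩ := (ih w).mp hw
          refine ⟨m+1, by omega, by simp; omega, ?_⟩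
          rw [List.take_succ_cons, List.sum_cons, ← hvw, h3]
      · rintro ⟨m, h1, h2, h3⟩
        cases m with
        | zero => omega
        | succ m =>
            rw [List.take_succ_cons, List.sum_cons] at h3
            rcases Nat.eq_zero_or_pos m with rfl | hm
            · simp at h3; simp [h3, presums]
            · refine List.mem_cons_of_mem _ (List.mem_map.mpr ⟨(t.take m).sum, ?_, ?_⟩)
              · exact (ih _).mpr ⟨m, hm, by simp at h2; omega, rfl⟩
              · omega

lemma mem_segSums (l : List Int) (v : Int) :
    v ∈ segSums l ↔ ∃ i m, 1 ≤ m ∧ i + m ≤ l.length ∧ v = ((l.drop i).take m).sum := by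
  induction l generalizing v with
  | nil =>
      constructor
      · intro h; cases h
      · rintro ⟨i, m, h1, h2, -⟩; simp at h2; omega
  | cons x t ih =>
      rw [segSums, List.mem_append]
      constructor
      · intro hv
        rcases hv with h | h
        · obtain ⟨m, h1, h2, h3⟩ := (mem_presums _ _).mp h
          exact ⟨0, m, h1, by simpa using h2, by simpa using h3⟩
        · obtain ⟨i, m, h1, h2, h3⟩ := (ih v).mp h
          exact ⟨i+1, m, h1, by simp; omega, by simpa using h3⟩
      · rintro ⟨i, m, h1, h2, h3⟩
        cases i with
        | zero => exact Or.inl ((mem_presums _ _).mpr ⟨m, h1, by simpa using h2, by simpa using h3⟩)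
        | succ i => exact Or.inr ((ih v).mpr ⟨i, m, h1, by simp at h2; omega, by simpa using h3⟩)

lemma mem_sufSums (l : List Int) (v : Int) :
    v ∈ sufSums l ↔ ∃ i, i < l.length ∧ v = (l.drop i).sum := by
  induction l generalizing v with
  | nil =>
      constructor
      · intro h; cases h
      · rintro ⟨i, h1, -⟩; simp at h1
  | cons x t ih =>
      rw [sufSums]
      constructor
      · intro hv
        rcases List.mem_cons.mp hv with h | h
        · exact ⟨0, by simp, by simpa using h⟩
        · obtain ⟨i, h1, h2⟩ := (ih v).mp h
          exact ⟨i+1, by simp; omega, by simpa using h2⟩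
      · rintro ⟨i, h1, h2⟩
        cases i with
        | zero => simp at h2; simp [h2]
        | succ i =>
            exact List.mem_cons_of_mem _ ((ih v).mpr ⟨i, by simp at h1; omega, by simpa using h2⟩)

lemma segSums_ne_nil (l : List Int) (h : l ≠ []) : segSums l ≠ [] := by
  cases l with
  | nil => cases h rfl
  | cons x t => simp [segSums, presums]

-- ---- Kadane append lemmas ----
lemma sufSums_append_singleton (p : List Int) (x : Int) :
    sufSums (p ++ [x]) = (sufSums p).map (fun v => v + x) ++ [x] := by
  induction p with
  | nil => simp [sufSums]
  | cons y t ih =>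
      simp only [List.cons_append, sufSums, ih, List.map_cons, List.sum_append,
        List.sum_cons, List.sum_nil]
      congr 1
      ring

lemma seg_append_eq (p : List Int) (x : Int) (i m : Nat) (h : i + m ≤ p.length) :
    ((p ++ [x]).drop i).take m = (p.drop i).take m := by
  rw [List.drop_append_of_le_length (by omega),
    List.take_append_of_le_length (by simp only [List.length_drop]; omega)]

lemma lmax_segSums_append (p : List Int) (x : Int) :
    lmax (segSums (p ++ [x])) = omax (lmax (segSums p)) (lmax (sufSums (p ++ [x]))) := by
  rw [← lmax_append]
  apply lmax_congr
  · intro v hv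
    obtain ⟨i, m, h1, h2, h3⟩ := (mem_segSums _ _).mp hv
    simp only [List.length_append, List.length_cons, List.length_nil] at h2
    refine ⟨v, ?_, le_refl v⟩
    rw [List.mem_append]
    by_cases hc : i + m ≤ p.length
    · exact Or.inl ((mem_segSums _ _).mpr ⟨i, m, h1, hc, by rw [h3, seg_append_eq p x i m hc]⟩)
    · refine Or.inr ((mem_sufSums _ _).mpr ⟨i, by simp; omega, ?_⟩)
      rw [h3, List.take_of_length_le]
      simp; omega
  · intro v hv
    refine ⟨v, ?_, le_refl v⟩
    rcases List.mem_append.mp hv with h | h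
    · obtain ⟨i, m, h1, h2, h3⟩ := (mem_segSums _ _).mp h
      refine (mem_segSums _ _).mpr ⟨i, m, h1, by simp; omega, ?_⟩
      rw [h3, seg_append_eq p x i m h2]
    · obtain ⟨i, h1, h2⟩ := (mem_sufSums _ _).mp h
      simp only [List.length_append, List.length_cons, List.length_nil] at h1
      refine (mem_segSums _ _).mpr ⟨i, p.length + 1 - i, by omega, by simp; omega, ?_⟩
      rw [h2, List.take_of_length_le]
      simp

lemma lmax_sufSums_append (p : List Int) (x : Int) :
    lmax (sufSums (p ++ [x]))
      = some (match lmax (sufSums p) with | none => x | some b => max x (x + b)) := by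
  rw [sufSums_append_singleton, lmax_append]
  have hm : lmax ((sufSums p).map (fun v => v + x)) = (lmax (sufSums p)).map (fun v => v + x) :=
    lmax_map_add x (sufSums p)
  rw [hm]
  cases lmax (sufSums p) with
  | none => simp [lmax_cons, lmax_nil, omax]
  | some b =>
      simp only [Option.map_some, lmax_cons, lmax_nil, omax]
      rw [max_comm, Int.add_comm b x]

lemma kadUpd_eq (p : List Int) (x : Int) :
    kadUpd (lmax (sufSums p), lmax (segSums p)) x
      = (lmax (sufSums (p ++ [x])), lmax (segSums (p ++ [x]))) := by
  have h1 := lmax_sufSums_append p x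
  have h2 := lmax_segSums_append p x
  rw [h1] at h2 ⊢
  rw [h2]
  cases lmax (segSums p) <;> simp [kadUpd, omax]

lemma kad_fold (l p : List Int) :
    l.foldl kadUpd (lmax (sufSums p), lmax (segSums p))
      = (lmax (sufSums (p ++ l)), lmax (segSums (p ++ l))) := by
  induction l generalizing p with
  | nil => simp
  | cons x t ih =>
      rw [List.foldl_cons, kadUpd_eq, ih (p ++ [x])]
      simp

lemma MS_eq_getD (l : List Int) (h : l ≠ []) :
    MS l = max (-100000) ((lmax (segSums l)).getD 0) := by
  cases hm : lmax (segSums l) with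
  | none => exact absurd ((lmax_eq_none_iff _).mp hm) (segSums_ne_nil l h)
  | some v => simp [MS, hm]

lemma cappedBest_eq (l : List Int) (h : l ≠ []) : cappedBest l = MS l := by
  have h2 := kad_fold l []
  simp only [List.nil_append, sufSums, segSums, lmax_nil] at h2
  rw [cappedBest, h2, MS_eq_getD l h]

-- ---- split_best spec ----
lemma splitStep_eq (p : List Int) (x : Int) (d acc : Option Int) :
    splitStep ((lmax (sufSums p), lmax (segSums p)), acc) (x, d)
      = ((lmax (sufSums (p ++ [x])), lmax (segSums (p ++ [x]))),
         omax acc (d.map (fun v => MS (p ++ [x]) + v))) := by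
  have hk := kadUpd_eq p x
  have hne : p ++ [x] ≠ [] := by simp
  cases hseg : lmax (segSums (p ++ [x])) with
  | none => exact absurd ((lmax_eq_none_iff _).mp hseg) (segSums_ne_nil _ hne)
  | some b =>
      have hMS : MS (p ++ [x]) = max (-100000) b := by rw [MS_eq_getD _ hne, hseg]; rfl
      cases d with
      | none => simp [splitStep, hk, hseg, omax_none_right]
      | some v =>
          cases acc with
          | none => simp [splitStep, hk, hseg, omax, hMS]
          | some a => simp [splitStep, hk, hseg, omax, hMS]

lemma split_fold (later : List (Option Int)) : ∀ (rest p : List Int) (acc : Option Int),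
    ((List.zip rest later).foldl splitStep ((lmax (sufSums p), lmax (segSums p)), acc)).2
      = omax acc (SC p rest later) := by
  induction later with
  | nil =>
      intro rest p acc
      rw [List.zip_nil_right]
      cases rest <;> simp [SC, omax_none_right]
  | cons d ds ih =>
      intro rest p acc
      cases rest with
      | nil => simp [SC, omax_none_right]
      | cons x t =>
          rw [List.zip_cons_cons, List.foldl_cons, splitStep_eq, ih t (p ++ [x]), SC,
            ← omax_assoc]

lemma splitBest_eq (suffix : List Int) (later : List (Option Int)) :
    splitBest suffix later = SC [] suffix later := by
  have := split_fold later suffix [] none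
  simpa [splitBest, lmax_nil, sufSums, segSums, omax] using this

-- ---- A's maximum_sum = MS ----
lemma foldl_max_proj {α : Type} (f : α → Int) (c : Int) (xs : List α) :
    xs.foldl (fun a x => max a (f x)) c
      = match lmax (xs.map f) with | none => c | some m => max c m := by
  induction xs generalizing c with
  | nil => rfl
  | cons x t ih =>
      rw [List.foldl_cons, ih, List.map_cons, lmax_cons]
      cases lmax (t.map f) <;> simp [omax, max_assoc]

lemma foldl_max_proj' {α : Type} (f : α → Int) (c : Int) (xs : List α) :
    xs.foldl (fun a x => max (f x) a) c
      = match lmax (xs.map f) with | none => c | some m => max c m := by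
  induction xs generalizing c with
  | nil => rfl
  | cons x t ih =>
      rw [List.foldl_cons, ih, List.map_cons, lmax_cons]
      cases lmax (t.map f) <;> simp [omax, max_left_comm, max_comm]

lemma foldl_foldl_max {α β : Type} (g : α → List β) (F : α → β → Int) (c : Int) (xs : List α) :
    xs.foldl (fun a i => (g i).foldl (fun a2 j => max a2 (F i j)) a) c
      = match lmax (xs.flatMap (fun i => (g i).map (F i))) with
        | none => c | some m => max c m := by
  induction xs generalizing c with
  | nil => rfl
  | cons x t ih =>
      rw [List.foldl_cons, ih, foldl_max_proj (F x) c (g x), List.flatMap_cons, lmax_append]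
      cases lmax ((g x).map (F x)) <;>
        cases lmax (t.flatMap fun i => (g i).map (F i)) <;>
          simp [omax, max_assoc]

lemma msA_eq (l : List Int) : msA l = MS l := by
  cases l with
  | nil => simp [msA, MS, segSums, lmax_nil]
  | cons a t =>
      rw [msA, if_neg (by simp : ¬(a :: t).length = 0), foldl_foldl_max]
      have hbig : lmax (((PySem.List.pyRange 0 ((a :: t).length : Int) 1)).flatMap
          (fun i => ((PySem.List.pyRange (i+1) (((a :: t).length : Int)+1) 1)).map
            (fun j => (PySem.List.slice (a :: t) (some i) (some j)).sum)))
          = lmax (segSums (a :: t)) := by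
        apply lmax_congr
        · intro v hv
          obtain ⟨i, hi, hv2⟩ := List.mem_flatMap.mp hv
          obtain ⟨j, hj, hv3⟩ := List.mem_map.mp hv2
          have hi' := PySem.List.mem_pyRange_one.mp hi
          have hj' := PySem.List.mem_pyRange_one.mp hj
          refine ⟨v, (mem_segSums _ _).mpr
            ⟨i.toNat, j.toNat - i.toNat, by omega, by omega, ?_⟩, le_refl v⟩
          rw [← hv3, PySem.List.slice_toNat _ (by omega) (by omega)]
        · intro v hv
          obtain ⟨i, m, h1, h2, h3⟩ := (mem_segSums _ _).mp hv
          refine ⟨v, ?_, le_refl v⟩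
          refine List.mem_flatMap.mpr ⟨(i : Int),
            PySem.List.mem_pyRange_one.mpr ⟨by omega, by omega⟩, ?_⟩
          refine List.mem_map.mpr ⟨((i + m : Nat) : Int),
            PySem.List.mem_pyRange_one.mpr ⟨by push_cast; omega, by push_cast; omega⟩, ?_⟩
          rw [PySem.List.slice_toNat _ (by omega) (by omega)]
          simp only [Int.toNat_natCast]
          have hmm : i + m - i = m := by omega
          rw [hmm, h3]
      rw [hbig]
      cases hseg : lmax (segSums (a :: t)) with
      | none => exact absurd ((lmax_eq_none_iff _).mp hseg) (segSums_ne_nil _ (by simp))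
      | some v => simp [MS, hseg]

-- ---- MS monotone on prefixes ----
lemma MS_take_le (l : List Int) (j : Nat) (hj : 1 ≤ j) (h : l ≠ []) :
    MS (l.take j) ≤ MS l := by
  by_cases hlen : l.length ≤ j
  · rw [List.take_of_length_le hlen]
  · have hlp : 0 < l.length := List.length_pos_of_ne_nil h
    have htne : l.take j ≠ [] := by
      apply List.ne_nil_of_length_pos
      rw [List.length_take]
      omega
    have hsub : ∀ v ∈ segSums (l.take j), v ∈ segSums l := by
      intro v hv
      obtain ⟨i, m, h1, h2, h3⟩ := (mem_segSums _ _).mp hv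
      rw [List.length_take] at h2
      refine (mem_segSums _ _).mpr ⟨i, m, h1, by omega, ?_⟩
      rw [h3, List.drop_take, List.take_take]
      congr 2
      omega
    cases hs1 : lmax (segSums (l.take j)) with
    | none => exact absurd ((lmax_eq_none_iff _).mp hs1) (segSums_ne_nil _ htne)
    | some v1 =>
        obtain ⟨v2, hs2, hle⟩ := le_lmax (segSums l) v1 (hsub v1 (lmax_mem _ _ hs1))
        simp only [MS, hs1, hs2]
        exact max_le_max (le_refl _) hle

-- ---- G basics ----
lemma G_nil (k : Nat) : G k [] = none := by
  match k with
  | 0 => rfl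
  | 1 => rfl
  | (k+2) => simp [G, lmax_nil]

lemma G_two_plus (k : Nat) (l : List Int) :
    G (k+2) l = lmax ((List.range (l.length - 1)).filterMap
      (fun j => (G (k+1) (l.drop (j+1))).map (fun v => MS (l.take (j+1)) + v))) := by
  rfl

-- ---- the cap-absorption key lemma ----
lemma capKey (os : List (Option Int)) (r : Int) :
    (match lmax (os.map (fun o => match o with
        | none => (-100000 : Int) | some v => max (-100000) (r + v))) with
     | none => (-100000 : Int) | some m => max (-100000) m)
      = (match lmax (os.filterMap id) with
         | none => (-100000 : Int) | some m => max (-100000) (r + m)) := by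
  induction os with
  | nil => rfl
  | cons o t ih =>
      have hL : ∀ (a : Int) (rest : List Int),
          (match lmax (a :: rest) with | none => (-100000:Int) | some m => max (-100000) m)
            = max (max (-100000) a)
              (match lmax rest with | none => (-100000:Int) | some m => max (-100000) m) := by
        intro a rest
        rw [lmax_cons]
        cases lmax rest with
        | none =>
            simp only [omax]
            exact (max_eq_left (le_trans (le_refl _) (le_max_left _ _))).symm
        | some m =>
            simp only [omax]
            simp only [max_def]
            split_ifs <;> omega
      have hfn : (none :: t).filterMap (id : Option Int → Option Int) = t.filterMap id := by
        simp
      have hfs : ∀ v : Int, ((some v) :: t).filterMap (id : Option Int → Option Int)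
          = v :: t.filterMap id := by
        intro v; simp
      cases o with
      | none =>
          rw [List.map_cons, hL, hfn, ih]
          have hge : (-100000:Int) ≤ (match lmax (t.filterMap id) with
              | none => (-100000:Int) | some m => max (-100000) (r+m)) := by
            cases lmax (t.filterMap id) with
            | none => exact le_refl _
            | some m => exact le_max_left _ _
          rw [max_self]
          exact max_eq_right hge
      | some v =>
          rw [List.map_cons, hL, hfs, ih, lmax_cons]
          cases lmax (t.filterMap id) with
          | none =>
              show max (max (-100000) (max (-100000) (r + v))) (-100000) = max (-100000) (r + v)
              simp only [max_def]
              split_ifs <;> omega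
          | some m =>
              show max (max (-100000) (max (-100000) (r + v))) (max (-100000) (r + m))
                = max (-100000) (r + max v m)
              simp only [max_def]
              split_ifs <;> omega

-- ---- main characterisation of A ----
lemma solveA_char (n : Nat) : ∀ (arr : List Int), arr.length = n → ∀ (r d l : Int),
    (d ≠ l → l - d < 1 → solve arr r d l = -100000) ∧
    (1 ≤ l - d → solve arr r d l =
      match G (l - d).toNat arr with
      | none => -100000
      | some v => max (-100000) (r + v)) := by
  induction n using Nat.strong_induction_on with
  | _ n IH =>
    intro arr hlen r d l
    cases arr with
    | nil =>
        constructor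
        · intro hd _
          rw [solve]
          simp [hd]
        · intro hk
          have hd : d ≠ l := by omega
          rw [G_nil, solve]
          simp [hd]
    | cons a t =>
        have hlen1 : ¬ (a :: t).length = 0 := by simp
        have hnpos : 1 ≤ n := by simp at hlen; omega
        have hunf : d ≠ l →
            solve (a :: t) r d l
              = match lmax ((PySem.List.pyRange 1 (((a :: t).length : Int)+1) 1).map
                  (fun j => solve ((a :: t).drop j.toNat)
                    (r + MS ((a :: t).take j.toNat)) (d+1) l)) with
                | none => -100000
                | some m => max (-100000) m := by
          intro hd
          rw [solve, if_neg hlen1, if_neg hd,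
            List.foldl_attach (f := fun ans (j : Int) =>
              max (solve (PySem.List.slice (a :: t) (some j) none)
                (r + msA (PySem.List.slice (a :: t) none (some j))) (d+1) l) ans),
            foldl_max_proj']
          congr 2
          apply List.map_congr_left
          intro j hj
          have hj' := PySem.List.mem_pyRange_one.mp hj
          rw [PySem.List.slice_from _ (by omega), PySem.List.slice_to _ (by omega), msA_eq]
        have hone : ((1:Int)) ∈ PySem.List.pyRange 1 (((a :: t).length : Int)+1) 1 :=
          PySem.List.mem_pyRange_one.mpr ⟨le_refl 1, by simp⟩
        constructor
        · intro hd hlt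
          rw [hunf hd]
          have hall : ∀ v ∈ (PySem.List.pyRange 1 (((a :: t).length : Int)+1) 1).map
              (fun j => solve ((a :: t).drop j.toNat)
                (r + MS ((a :: t).take j.toNat)) (d+1) l), v = -100000 := by
            intro v hv
            obtain ⟨j, hj, hv2⟩ := List.mem_map.mp hv
            have hj' := PySem.List.mem_pyRange_one.mp hj
            have hlt' : ((a :: t).drop j.toNat).length < n := by
              rw [List.length_drop]; rw [← hlen]; omega
            rw [← hv2,
              (IH _ hlt' _ rfl (r + MS ((a :: t).take j.toNat)) (d+1) l).1 (by omega) (by omega)]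
          have hmem0 : (-100000 : Int) ∈ (PySem.List.pyRange 1 (((a :: t).length : Int)+1) 1).map
              (fun j => solve ((a :: t).drop j.toNat)
                (r + MS ((a :: t).take j.toNat)) (d+1) l) := by
            have hm := List.mem_map_of_mem (l := PySem.List.pyRange 1 (((a :: t).length : Int)+1) 1)
              (f := fun j => solve ((a :: t).drop j.toNat)
                (r + MS ((a :: t).take j.toNat)) (d+1) l) hone
            rw [hall _ hm] at hm
            exact hm
          rw [lmax_eq_some _ _ hmem0 (fun x hx => le_of_eq (hall x hx))]
          simp
        · intro hk
          have hd : d ≠ l := by omega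
          rw [hunf hd]
          by_cases hk1 : l - d = 1
          · have heq : d + 1 = l := by omega
            have hmapeq : (PySem.List.pyRange 1 (((a :: t).length : Int)+1) 1).map
                (fun j => solve ((a :: t).drop j.toNat)
                  (r + MS ((a :: t).take j.toNat)) (d+1) l)
              = (PySem.List.pyRange 1 (((a :: t).length : Int)+1) 1).map
                (fun j => r + MS ((a :: t).take j.toNat)) := by
              apply List.map_congr_left
              intro j hj
              rw [solve]
              by_cases h0 : ((a :: t).drop j.toNat).length = 0 <;> simp [h0, heq]
            rw [hmapeq]
            have hmemn : (((a :: t).length : Int)) ∈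
                PySem.List.pyRange 1 (((a :: t).length : Int)+1) 1 :=
              PySem.List.mem_pyRange_one.mpr ⟨by simp, by omega⟩
            have hval : (fun j : Int => r + MS ((a :: t).take j.toNat)) ((a :: t).length : Int)
                = r + MS (a :: t) := by
              simp only [Int.toNat_natCast, List.take_length]
            have hmem : r + MS (a :: t) ∈ (PySem.List.pyRange 1 (((a :: t).length : Int)+1) 1).map
                (fun j => r + MS ((a :: t).take j.toNat)) := by
              rw [← hval]
              exact List.mem_map_of_mem hmemn
            have hub : ∀ v ∈ (PySem.List.pyRange 1 (((a :: t).length : Int)+1) 1).map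
                (fun j => r + MS ((a :: t).take j.toNat)), v ≤ r + MS (a :: t) := by
              intro v hv
              obtain ⟨j, hj, hv2⟩ := List.mem_map.mp hv
              have hj' := PySem.List.mem_pyRange_one.mp hj
              rw [← hv2]
              have hms := MS_take_le (a :: t) j.toNat (by omega) (by simp)
              omega
            rw [lmax_eq_some _ _ hmem hub]
            have hk1' : (l - d).toNat = 1 := by omega
            rw [hk1']
            simp [G]
          · have hk2 : 2 ≤ l - d := by omega
            have hk'1 : 1 ≤ (l - d).toNat - 1 := by omega
            have hmapeq : (PySem.List.pyRange 1 (((a :: t).length : Int)+1) 1).map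
                (fun j => solve ((a :: t).drop j.toNat)
                  (r + MS ((a :: t).take j.toNat)) (d+1) l)
              = ((PySem.List.pyRange 1 (((a :: t).length : Int)+1) 1).map
                  (fun j => (G ((l - d).toNat - 1) ((a :: t).drop j.toNat)).map
                    (fun v => MS ((a :: t).take j.toNat) + v))).map
                  (fun o => match o with
                    | none => (-100000 : Int) | some v => max (-100000) (r + v)) := by
              rw [List.map_map]
              apply List.map_congr_left
              intro j hj
              have hj' := PySem.List.mem_pyRange_one.mp hj
              have hlt' : ((a :: t).drop j.toNat).length < n := by
                rw [List.length_drop]; rw [← hlen]; omega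
              have hIH := (IH _ hlt' _ rfl (r + MS ((a :: t).take j.toNat)) (d+1) l).2 (by omega)
              have hcast : (l - (d+1)).toNat = (l - d).toNat - 1 := by omega
              rw [hIH, hcast]
              simp only [Function.comp_apply]
              cases G ((l - d).toNat - 1) ((a :: t).drop j.toNat) with
              | none => rfl
              | some w =>
                  show max (-100000) (r + MS ((a :: t).take j.toNat) + w)
                    = max (-100000) (r + (MS ((a :: t).take j.toNat) + w))
                  rw [add_assoc]
            rw [hmapeq, capKey]
            have hGe : lmax (((PySem.List.pyRange 1 (((a :: t).length : Int)+1) 1).map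
                  (fun j => (G ((l - d).toNat - 1) ((a :: t).drop j.toNat)).map
                    (fun v => MS ((a :: t).take j.toNat) + v))).filterMap id)
                = G (l - d).toNat (a :: t) := by
              rw [List.filterMap_map, Function.id_comp]
              rw [PySem.List.pyRange_one_succ_right (by simp : (1:Int) ≤ ((a :: t).length : Int)),
                List.filterMap_append]
              have hlast : List.filterMap
                  (fun j : Int => (G ((l - d).toNat - 1) ((a :: t).drop j.toNat)).map
                    (fun v => MS ((a :: t).take j.toNat) + v)) [((a :: t).length : Int)] = [] := by
                simp only [List.filterMap_cons, List.filterMap_nil, Int.toNat_natCast,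
                  List.drop_length, G_nil, Option.map_none]
              rw [hlast, List.append_nil]
              rw [PySem.List.pyRange_one 1 ((a :: t).length : Int), List.filterMap_map]
              have hc : (((a :: t).length : Int) - 1).toNat = (a :: t).length - 1 := by omega
              rw [hc]
              have hG : G (l - d).toNat (a :: t)
                  = lmax ((List.range ((a :: t).length - 1)).filterMap
                      (fun j => (G ((l - d).toNat - 1) ((a :: t).drop (j+1))).map
                        (fun v => MS ((a :: t).take (j+1)) + v))) := by
                obtain ⟨k2, hk2e⟩ : ∃ k2, (l - d).toNat = k2 + 2 := ⟨(l - d).toNat - 2, by omega⟩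
                rw [hk2e, G_two_plus]
                rfl
              rw [hG]
              congr 1
              apply List.filterMap_congr
              intro j hj
              simp only [Function.comp_apply]
              have ht : ((1 : Int) + (j : Int)).toNat = j + 1 := by omega
              rw [ht]
            rw [hGe]

-- ---- B side: levels compute G ----
lemma SC_G (k : Nat) (l p : List Int) :
    SC p l ((List.range (l.length - 1)).map (fun j => G k (l.drop (j+1))))
      = lmax ((List.range (l.length - 1)).filterMap
          (fun j => (G k (l.drop (j+1))).map (fun v => MS (p ++ l.take (j+1)) + v))) := by
  induction l generalizing p with
  | nil => simp [SC, lmax_nil]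
  | cons x t ih =>
      cases t with
      | nil => simp [SC, lmax_nil]
      | cons y u =>
          rw [show (x :: y :: u).length - 1 = u.length + 1 from by simp,
            List.range_succ_eq_map, List.map_cons, List.map_map, SC]
          have hrest : (List.range u.length).map
                ((fun j => G k ((x :: y :: u).drop (j+1))) ∘ Nat.succ)
              = (List.range ((y :: u).length - 1)).map (fun j => G k ((y :: u).drop (j+1))) := by
            simp only [List.length_cons, Nat.add_sub_cancel]
            apply List.map_congr_left
            intro j hj
            simp [Function.comp]
          rw [hrest, ih (p ++ [x]), lmax_filterMap_cons]
          congr 1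
          rw [List.filterMap_map]
          simp only [List.length_cons, Nat.add_sub_cancel]
          congr 1
          apply List.filterMap_congr
          intro j hj
          simp only [Function.comp_apply, List.drop_succ_cons, List.take_succ_cons]
          simp [List.append_assoc]

lemma step_spec (arr : List Int) (k : Nat) (hk : 1 ≤ k) :
    ((PySem.List.enumerate ((List.range arr.length).map (fun i => arr.drop i)) 0).map
        (fun si => splitBest si.2
          (((List.range arr.length).map (fun i => G k (arr.drop i))).drop (si.1 + 1).toNat)))
      = (List.range arr.length).map (fun i => G (k+1) (arr.drop i)) := by
  rw [PySem.List.enumerate_eq_map_pyRange _ ([] : List Int), PySem.List.len_eq,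
    show (((List.range arr.length).map (fun i => arr.drop i)).length) = arr.length from by simp,
    List.map_map, PySem.List.pyRange_zero_natCast, List.map_map]
  apply List.map_congr_left
  intro i hi
  have hi' : i < arr.length := List.mem_range.mp hi
  simp only [Function.comp_apply]
  have hget : PySem.List.pyGetD ((List.range arr.length).map (fun i => arr.drop i)) (i : Int) []
      = arr.drop i := by
    rw [PySem.List.pyGetD_of_nonneg _ _ (by omega), Int.toNat_natCast]
    exact PySem.List.getD_map_range _ _ _ _ hi'
  rw [hget, show ((i : Int) + 1).toNat = i + 1 from by omega]
  have hlater : (((List.range arr.length).map (fun i => G k (arr.drop i))).drop (i+1))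
      = (List.range ((arr.drop i).length - 1)).map (fun j => G k ((arr.drop i).drop (j+1))) := by
    rw [← List.map_drop,
      show arr.length = (i+1) + (arr.length - (i+1)) from by omega, List.range_add,
      List.drop_append_of_le_length (by simp),
      show (List.range (i+1)).drop (i+1) = [] from by simp,
      List.nil_append, List.map_map]
    have hlen2 : (arr.drop i).length - 1 = arr.length - (i+1) := by
      rw [List.length_drop]; omega
    rw [hlen2]
    apply List.map_congr_left
    intro j hj
    simp only [Function.comp_apply]
    rw [List.drop_drop, show i + (j + 1) = i + 1 + j from by omega]
  rw [splitBest_eq, hlater, SC_G]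
  obtain ⟨k0, rfl⟩ : ∃ k0, k = k0 + 1 := ⟨k - 1, by omega⟩
  rw [G_two_plus]
  simp only [List.nil_append]

lemma levels_spec (t : Nat) : ∀ (arr : List Int) (k : Nat), 1 ≤ k →
    bLevels ((List.range arr.length).map (fun i => arr.drop i))
        ((List.range arr.length).map (fun i => G k (arr.drop i))) t
      = (List.range arr.length).map (fun i => G (k + t) (arr.drop i)) := by
  induction t with
  | zero => intro arr k hk; rfl
  | succ t ih =>
      intro arr k hk
      show bLevels _ _ (t+1) = _
      rw [bLevels, step_spec arr k hk, ih arr (k+1) (by omega)]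
      have h3 : k + 1 + t = k + (t + 1) := by omega
      rw [h3]

lemma G_none_of_big (k : Nat) : ∀ (l : List Int), l.length < k → G k l = none := by
  induction k using Nat.strong_induction_on with
  | _ k IH =>
    intro l hl
    match k, hl with
    | 1, hl =>
        have : l = [] := List.length_eq_zero_iff.mp (by omega)
        rw [this, G_nil]
    | (k+2), hl =>
        rw [G_two_plus]
        have hall : (List.range (l.length - 1)).filterMap
            (fun j => (G (k+1) (l.drop (j+1))).map (fun v => MS (l.take (j+1)) + v)) = [] := by
          apply List.filterMap_eq_nil_iff.mpr
          intro j hj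
          rw [IH (k+1) (by omega) _ (by rw [List.length_drop]; omega)]
          rfl
        rw [hall, lmax_nil]

lemma solveB_char (arr : List Int) (r d l : Int) (hd : d ≠ l) (hk : 1 ≤ l - d)
    (hne : arr ≠ []) :
    solve_alt arr r d l =
      match G (l - d).toNat arr with
      | none => -100000
      | some v => max (-100000) (r + v) := by
  by_cases hbig : (arr.length : Int) < l - d
  · rw [G_none_of_big _ _ (by omega), solve_alt]
    simp only [if_neg hd]
    rw [if_pos (Or.inr (Or.inr hbig))]
  have hcond : ¬(l - d < 1 ∨ arr.length = 0 ∨ (arr.length : Int) < l - d) := by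
    rintro (h | h | h)
    · omega
    · exact hne (List.length_eq_zero_iff.mp h)
    · exact hbig h
  have hdp0 : ((List.range arr.length).map (fun i => arr.drop i)).map
        (fun s => some (cappedBest s))
      = (List.range arr.length).map (fun i => G 1 (arr.drop i)) := by
    rw [List.map_map]
    apply List.map_congr_left
    intro i hi
    have hi' := List.mem_range.mp hi
    simp only [Function.comp_apply]
    have hne2 : arr.drop i ≠ [] := by
      apply List.ne_nil_of_length_pos
      rw [List.length_drop]
      omega
    rw [cappedBest_eq _ hne2]
    simp only [G]
    rw [if_neg (by simp [List.isEmpty_iff, hne2])]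
  rw [solve_alt]
  simp only [if_neg hd, if_neg hcond]
  rw [hdp0, levels_spec _ arr 1 (le_refl 1),
    show 1 + (l - d - 1).toNat = (l - d).toNat from by omega]
  have hget0 : ((List.range arr.length).map (fun i => G (l - d).toNat (arr.drop i))).getD 0 none
      = G (l - d).toNat arr := by
    rw [PySem.List.getD_map_range _ _ _ _ (by
      have := List.length_pos_of_ne_nil hne
      omega), List.drop_zero]
  rw [hget0]

-- ===== VERDICT (by name: the statement is the Claim_ definition above) =====
theorem solve_spec : Claim_equal_solve := by
  intro arr r d l _
  show solve arr r d l = solve_alt arr r d l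
  by_cases hd : d = l
  · subst hd
    rw [solve_alt]
    rw [solve]
    by_cases h : arr.length = 0 <;> simp [h]
  · by_cases hk : 1 ≤ l - d
    · by_cases hne : arr = []
      · subst hne
        rw [(solveA_char 0 [] rfl r d l).2 hk, G_nil]
        rw [solve_alt]
        simp [hd]
      · rw [(solveA_char arr.length arr rfl r d l).2 hk, solveB_char arr r d l hd hk hne]
    · rw [(solveA_char arr.length arr rfl r d l).1 hd (by omega)]
      rw [solve_alt]
      simp only [if_neg hd]
      rw [if_pos (Or.inl (by omega : l - d < 1))]
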